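-- pv_equiv track=rewrite | github.com/jhwa426/Python | COMPSCI 130/Assignment/Assignment02/Assignment 2.py | hash_string_weighted_folding
-- ===== SOURCE A (Python) =====
-- def hash_string_weighted_folding(string_to_hash, modulus):
--     index = 0
--     result = 0
--
--     for number in string_to_hash:
--         if index >= 4:
--             ascii_code = ord(number)
--             result += ascii_code
--             index = 1
--         else:
--             ascii_code = ord(number)
--             result += ascii_code * (256**index)
--             index += 1
--
--     result = result % modulus
--
--     return result
-- ===== SOURCE B (Python) =====
-- def hash_string_weighted_folding(string_to_hash, modulus):
--     result = 0
--     for start in range(0, len(string_to_hash), 4):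
--         chunk = string_to_hash[start:start + 4]
--         for j, c in enumerate(chunk):
--             result += ord(c) * (256 ** j)
--     return result % modulus
-- ===== Notes on version B (the rewrite author's own statement) =====
-- stated objective: alternative
-- what changed: Replaces the flat single loop with a stateful resetting index counter by an explicit chunked decomposition: an outer loop over 4-character slices and an inner enumerate loop weighting each position by 256**j.
import Mathlib
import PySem

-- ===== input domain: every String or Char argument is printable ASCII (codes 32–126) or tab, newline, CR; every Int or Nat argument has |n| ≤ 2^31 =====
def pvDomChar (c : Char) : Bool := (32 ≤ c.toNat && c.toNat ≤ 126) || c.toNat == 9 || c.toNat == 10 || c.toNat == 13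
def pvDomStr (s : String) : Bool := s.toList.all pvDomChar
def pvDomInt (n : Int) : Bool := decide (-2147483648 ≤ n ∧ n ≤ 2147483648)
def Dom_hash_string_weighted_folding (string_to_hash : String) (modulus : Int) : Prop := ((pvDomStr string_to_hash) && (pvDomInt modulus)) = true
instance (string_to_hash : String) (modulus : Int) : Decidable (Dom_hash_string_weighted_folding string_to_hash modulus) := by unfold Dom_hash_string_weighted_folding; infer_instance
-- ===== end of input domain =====

-- B replaces A's flat loop with a resetting index counter by an outer loop over
-- 4-character chunks and an inner positional loop (alternative decomposition, same cost).

-- ===== PORT A =====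
-- loop body of A: state = (index, result); Python's 256**index ported as
-- 256 ^ index.toNat (index is provably ≥ 0 along A's loop, so this is exact)
def pvStepA (st : Int × Int) (number : Char) : Int × Int :=
  if st.1 ≥ 4 then (1, st.2 + (number.toNat : Int))
  else (st.1 + 1, st.2 + (number.toNat : Int) * 256 ^ st.1.toNat)

def hash_string_weighted_folding (string_to_hash : String) (modulus : Int) : Int :=
  let st := string_to_hash.toList.foldl pvStepA (0, 0)
  PySem.Int.mod st.2 modulus

-- ===== PORT B =====
-- inner loop body of B: result += ord(c) * (256 ** j)  (j from enumerate, ≥ 0)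
def pvStepB (r : Int) (jc : Int × Char) : Int :=
  r + (jc.2.toNat : Int) * 256 ^ jc.1.toNat

def hash_string_weighted_folding_alt (string_to_hash : String) (modulus : Int) : Int :=
  let cs := string_to_hash.toList
  let result := (PySem.List.pyRange 0 (cs.length : Int) 4).foldl
    (fun result start =>
      (PySem.List.enumerate (PySem.List.slice cs (some start) (some (start + 4)))).foldl
        pvStepB result)
    0
  PySem.Int.mod result modulus

-- ===== PRECONDITION & SPEC =====
-- Pre_ excludes modulus = 0, on which Python's '%' raises ZeroDivisionError (in both A and B)
def Pre_hash_string_weighted_folding (string_to_hash : String) (modulus : Int) : Prop := modulus ≠ 0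
instance (string_to_hash : String) (modulus : Int) : Decidable (Pre_hash_string_weighted_folding string_to_hash modulus) := by unfold Pre_hash_string_weighted_folding; infer_instance
def pvWitness_hash_string_weighted_folding : String × Int := ("abcdef", 97)

def Spec_hash_string_weighted_folding (string_to_hash : String) (modulus : Int) (out : Int) : Prop := out = hash_string_weighted_folding_alt string_to_hash modulus
instance (string_to_hash : String) (modulus : Int) (out : Int) : Decidable (Spec_hash_string_weighted_folding string_to_hash modulus out) := by unfold Spec_hash_string_weighted_folding; infer_instance

-- ===== CLAIM (what is proved, stated in full; the proofs are below) =====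
def Claim_equal_hash_string_weighted_folding : Prop := ∀ (string_to_hash : String) (modulus : Int), Dom_hash_string_weighted_folding string_to_hash modulus → Pre_hash_string_weighted_folding string_to_hash modulus → Spec_hash_string_weighted_folding string_to_hash modulus (hash_string_weighted_folding string_to_hash modulus)

-- ===== LEMMAS AND PROOFS =====

-- value contributed by one ≤4-character chunk
def pvChunkVal (chunk : List Char) : Int :=
  ((PySem.List.enumerate chunk).map (fun jc => (jc.2.toNat : Int) * 256 ^ jc.1.toNat)).sum

-- the common weighted sum, by 4-character chunks
def pvSumW (l : List Char) : Int :=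
  if l = [] then 0 else pvChunkVal (l.take 4) + pvSumW (l.drop 4)
termination_by l.length
decreasing_by
  simp only [List.length_drop]
  have : l.length ≠ 0 := by simpa [List.length_eq_zero_iff] using ‹¬ l = []›
  omega

theorem pvSumW_nil : pvSumW [] = 0 := by rw [pvSumW]; simp

theorem pvInner_fold (chunk : List Char) (r : Int) :
    (PySem.List.enumerate chunk).foldl pvStepB r = r + pvChunkVal chunk := by
  unfold pvStepB pvChunkVal
  exact PySem.List.foldl_add _ _ _

-- from index 4 and index 0 the A-loop produces the same result component
theorem pvA_reset (l : List Char) (r : Int) :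
    (l.foldl pvStepA (4, r)).2 = (l.foldl pvStepA (0, r)).2 := by
  cases l with
  | nil => rfl
  | cons c t => simp [pvStepA]

theorem pvA_fold : ∀ (l : List Char) (r : Int),
    (l.foldl pvStepA (0, r)).2 = r + pvSumW l
  | [], r => by rw [pvSumW]; simp
  | [a], r => by
      rw [pvSumW]
      simp [pvStepA, pvChunkVal, PySem.List.enumerate, pvSumW_nil]
  | [a, b], r => by
      rw [pvSumW]
      simp [pvStepA, pvChunkVal, PySem.List.enumerate, pvSumW_nil]
      ring
  | [a, b, c], r => by
      rw [pvSumW]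
      simp [pvStepA, pvChunkVal, PySem.List.enumerate, pvSumW_nil]
      ring
  | a :: b :: c :: d :: rest, r => by
      rw [pvSumW]
      simp only [List.foldl_cons]
      have h1 : pvStepA (0, r) a = (1, r + (a.toNat : Int)) := by
        simp [pvStepA]
      have hrest : ∀ x : Int, (rest.foldl pvStepA (4, x)).2 = x + pvSumW rest := by
        intro x
        rw [pvA_reset, pvA_fold rest x]
      simp only [pvStepA]
      norm_num
      rw [hrest]
      simp [pvChunkVal, PySem.List.enumerate]
      ring

-- range(j, b, 4) induction forms
theorem pvRange4_nil (a b : Int) (h : b ≤ a) : PySem.List.pyRange a b 4 = [] := by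
  rw [PySem.List.pyRange_of_pos a b (by norm_num)]
  simp [show ¬ a < b by omega]

theorem pvRange4_cons (a b : Int) (h : a < b) :
    PySem.List.pyRange a b 4 = a :: PySem.List.pyRange (a + 4) b 4 := by
  rw [PySem.List.pyRange_of_pos a b (by norm_num),
      PySem.List.pyRange_of_pos (a + 4) b (by norm_num)]
  by_cases h4 : a + 4 < b
  · have hN : ((b - a + 4 - 1) / 4).toNat = ((b - (a + 4) + 4 - 1) / 4).toNat + 1 := by
      omega
    rw [if_pos h, if_pos h4, hN, List.range_succ_eq_map]
    simp [List.map_map, Function.comp]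
    intro k _
    ring
  · have hN : ((b - a + 4 - 1) / 4).toNat = 1 := by omega
    rw [if_pos h, if_neg h4, hN]
    simp

theorem pvB_fold (cs : List Char) : ∀ (j : Nat) (r : Int),
    (PySem.List.pyRange (j : Int) (cs.length : Int) 4).foldl
      (fun result start =>
        (PySem.List.enumerate (PySem.List.slice cs (some start) (some (start + 4)))).foldl
          pvStepB result) r
    = r + pvSumW (cs.drop j) := by
  intro j r
  by_cases hj : j < cs.length
  · rw [pvRange4_cons _ _ (by exact_mod_cast hj)]
    simp only [List.foldl_cons]
    have hs : PySem.List.slice cs (some (j : Int)) (some ((j : Int) + 4))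
        = (cs.drop j).take 4 := by
      exact_mod_cast PySem.List.slice_natCast_add cs j 4
    rw [hs, pvInner_fold]
    have hcast : ((j : Int) + 4) = ((j + 4 : Nat) : Int) := by push_cast; ring
    rw [hcast, pvB_fold cs (j + 4) (r + pvChunkVal (List.take 4 (List.drop j cs)))]
    rw [show cs.drop (j + 4) = (cs.drop j).drop 4 by simp]
    conv_rhs => rw [pvSumW]
    rw [if_neg (by simp at *; omega)]
    ring
  · rw [pvRange4_nil _ _ (by exact_mod_cast Nat.le_of_not_lt hj)]
    rw [List.drop_eq_nil_of_le (by omega), pvSumW_nil]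
    simp
termination_by j => cs.length - j
decreasing_by omega

-- ===== VERDICT (by name: the statement is the Claim_ definition above) =====
theorem hash_string_weighted_folding_spec : Claim_equal_hash_string_weighted_folding := by
  intro s m _ _
  unfold Spec_hash_string_weighted_folding hash_string_weighted_folding hash_string_weighted_folding_alt
  have hA := pvA_fold s.toList 0
  have hB := pvB_fold s.toList 0 0
  simp only [Nat.cast_zero, List.drop_zero] at hB
  simp only [hA, hB, zero_add]
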